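-- pv_equiv track=rewrite | github.com/diversen/python-mysql-object | mysql_object/sql_query.py | get_columns_and_values
-- ===== SOURCE A (Python) =====
-- def get_columns_and_values(dict, keys_filter=None):
--     """
--     Returns keys as a list and values as a tuple from a dictionary
--     This is easy to use with sql queries
--     """
--
--     # only include keys that are in keys_filter
--     if keys_filter:
--         for key in list(dict.keys()):
--             if key not in keys_filter:
--                 dict.pop(key, None)
--
--     keys = list(dict.keys())
--
--     if keys_filter:
--         keys.sort(key=keys_filter.index)
--
--     values = tuple(dict.values())
--
--     if keys_filter:
--         values = tuple(dict[key] for key in keys)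
--
--     return keys, values
-- ===== SOURCE B (Python) =====
-- def get_columns_and_values(dict, keys_filter=None):
--     """
--     Returns keys as a list and values as a tuple from a dictionary
--     This is easy to use with sql queries
--     """
--     # NOTE: unlike the original, this does NOT mutate the dict argument
--     # (the original pops filtered-out keys in place); return value is identical.
--     if not keys_filter:
--         return list(dict.keys()), tuple(dict.values())
--     keys = []
--     seen = set()
--     for k in keys_filter:
--         if k in dict and k not in seen:
--             keys.append(k)
--             seen.add(k)
--     return keys, tuple(dict[k] for k in keys)
-- ===== Notes on version B (the rewrite author's own statement) =====
-- stated objective: faster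
-- what changed: Instead of destructively popping non-filter keys from the dict and then sorting the surviving keys by keys_filter.index, B walks keys_filter once in order, keeping each key that is in the dict and not yet seen (hash-set dedup), and reads the values straight from the untouched dict; B does not mutate the dict argument (return value only is claimed equal).
import Mathlib
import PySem

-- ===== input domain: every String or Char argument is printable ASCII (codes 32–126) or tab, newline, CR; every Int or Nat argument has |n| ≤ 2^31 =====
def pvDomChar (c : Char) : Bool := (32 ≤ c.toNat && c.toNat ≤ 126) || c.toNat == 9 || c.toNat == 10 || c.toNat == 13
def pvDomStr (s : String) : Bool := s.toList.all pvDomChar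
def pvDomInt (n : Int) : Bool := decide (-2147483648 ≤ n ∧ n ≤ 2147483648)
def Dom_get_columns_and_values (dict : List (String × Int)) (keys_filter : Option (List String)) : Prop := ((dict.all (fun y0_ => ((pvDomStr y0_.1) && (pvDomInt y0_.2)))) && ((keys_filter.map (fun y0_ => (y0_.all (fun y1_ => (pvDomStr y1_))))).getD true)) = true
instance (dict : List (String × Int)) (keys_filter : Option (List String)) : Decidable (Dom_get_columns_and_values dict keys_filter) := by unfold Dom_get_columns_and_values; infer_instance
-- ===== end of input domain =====

-- B replaces A's pop-then-sort-by-filter-index with a single ordered pass over the filter list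
-- (hash-set dedup, values read from the untouched dict); the equivalence proved is about the RETURN
-- value only: A pops filtered-out keys from its dict argument in place, B does not mutate it.

-- ===== PORT A =====
-- Literal port of A. Notes on exactness: 'dict.pop(key, None)' is Dict.erase (key is always present
-- here); 'keys_filter.index' raises only for keys absent from keys_filter, but after the pop loop
-- every surviving key is in keys_filter, so '.getD 0' is never the value used; likewise 'dict[key]'
-- (KeyError) is only evaluated at surviving keys, so '.getD 0' is never the value used.
def get_columns_and_values (dict : List (String × Int)) (keys_filter : Option (List String)) : List String × List Int :=
  let d := PySem.Dict.ofList dict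
  let kf := keys_filter.getD []
  -- if keys_filter: for key in list(dict.keys()): if key not in keys_filter: dict.pop(key, None)
  let d := if kf.isEmpty then d else
    d.keys.foldl (fun dd key => if kf.contains key then dd else dd.erase key) d
  -- keys = list(dict.keys())
  let keys := d.keys
  -- if keys_filter: keys.sort(key=keys_filter.index)
  let keys := if kf.isEmpty then keys else
    PySem.List.sorted keys (fun k => (PySem.List.index? kf k).getD 0)
  -- values = tuple(dict.values())
  let values := d.values
  -- if keys_filter: values = tuple(dict[key] for key in keys)
  let values := if kf.isEmpty then values else
    keys.map (fun k => (d.get? k).getD 0)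
  (keys, values)

-- ===== PORT B =====
-- Literal port of Source B: one pass over keys_filter with a 'seen' set; 'dict[k]' is only evaluated at
-- keys with 'k in dict', so '.getD 0' is never the value used.
def get_columns_and_values_alt (dict : List (String × Int)) (keys_filter : Option (List String)) : List String × List Int :=
  let d := PySem.Dict.ofList dict
  match keys_filter with
  | none => (d.keys, d.values)
  | some kf =>
    if kf.isEmpty then (d.keys, d.values) else
      let r := kf.foldl (fun (acc : List String × PySem.Set String) k =>
          if d.contains k && !(acc.2.contains k) then (acc.1 ++ [k], acc.2.add k) else acc)
        ([], PySem.Set.empty)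
      (r.1, r.1.map (fun k => (d.get? k).getD 0))

-- ===== PRECONDITION & SPEC =====
def Spec_get_columns_and_values (dict : List (String × Int)) (keys_filter : Option (List String)) (out : List String × List Int) : Prop := out = get_columns_and_values_alt dict keys_filter
instance (dict : List (String × Int)) (keys_filter : Option (List String)) (out : List String × List Int) : Decidable (Spec_get_columns_and_values dict keys_filter out) := by unfold Spec_get_columns_and_values; infer_instance

-- ===== CLAIM (what is proved, stated in full; the proofs are below) =====
def Claim_equal_get_columns_and_values : Prop := ∀ (dict : List (String × Int)) (keys_filter : Option (List String)), Dom_get_columns_and_values dict keys_filter → Spec_get_columns_and_values dict keys_filter (get_columns_and_values dict keys_filter)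

-- ===== LEMMAS AND PROOFS =====

theorem eraseLoop_items (ks kf : List String) (d : PySem.Dict String Int) :
    (ks.foldl (fun dd key => if kf.contains key then dd else dd.erase key) d).items
      = d.items.filter (fun p => kf.contains p.1 || !ks.contains p.1) := by
  induction ks generalizing d with
  | nil => simp
  | cons k t ih =>
    simp only [List.foldl_cons]
    by_cases hk : kf.contains k = true
    · rw [if_pos hk, ih]
      apply List.filter_congr
      intro p _
      by_cases hpk : p.1 = k
      · have hk2 : k ∈ kf := by simpa using hk
        simp [hpk, hk2]
      · simp [hpk]
    · rw [if_neg hk, ih]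
      have : (d.erase k).items = d.items.filter (fun p => !(p.1 == k)) := rfl
      rw [this, List.filter_filter]
      apply List.filter_congr
      intro p _
      by_cases hpk : p.1 = k
      · subst hpk
        simp
        simpa using hk
      · simp [hpk]

theorem dedup_pairwise_idxOf (kf : List String) :
    (PySem.Set.ofList kf).Pairwise (fun a b => kf.idxOf a < kf.idxOf b) := by
  induction kf with
  | nil => simp [PySem.Set.ofList]
  | cons x t ih =>
    rw [PySem.Set.ofList_cons]
    refine List.Pairwise.cons ?_ ?_
    · intro b hb
      have hbx : b ≠ x := ((PySem.Set.mem_discard _ _ _).mp hb).2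
      simp [hbx.symm]
    · have h1 : ((PySem.Set.ofList t).discard x).Pairwise (fun a b => t.idxOf a < t.idxOf b) := by
        exact List.Pairwise.filter _ ih
      refine h1.imp_of_mem ?_
      intro a b ha hb hab
      have hax : a ≠ x := ((PySem.Set.mem_discard _ _ _).mp ha).2
      have hbx : b ≠ x := ((PySem.Set.mem_discard _ _ _).mp hb).2
      simp [hax.symm, hbx.symm]
      omega

theorem buildPair (d : PySem.Dict String Int) (kf : List String) (acc : List String) :
    kf.foldl (fun (acc : List String × PySem.Set String) k =>
        if d.contains k && !(acc.2.contains k) then (acc.1 ++ [k], acc.2.add k) else acc)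
      (acc, acc)
    = (kf.foldl (fun a k => if d.contains k && !(a.contains k) then a ++ [k] else a) acc,
       kf.foldl (fun a k => if d.contains k && !(a.contains k) then a ++ [k] else a) acc) := by
  induction kf generalizing acc with
  | nil => rfl
  | cons x t ih =>
    simp only [List.foldl_cons, PySem.Set.contains, PySem.Set.add] at ih ⊢
    by_cases hd : d.contains x = true <;> by_cases hm : x ∈ acc <;>
      simp [hd, hm] at ih ⊢ <;> exact ih _

theorem buildChar (d : PySem.Dict String Int) (kf : List String) (acc : List String) :
    kf.foldl (fun a k => if d.contains k && !(a.contains k) then a ++ [k] else a) acc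
      = acc ++ (PySem.Set.ofList kf).filter (fun k => d.contains k && !(acc.contains k)) := by
  induction kf generalizing acc with
  | nil => simp [PySem.Set.ofList]
  | cons x t ih =>
    rw [PySem.Set.ofList_cons]
    simp only [List.foldl_cons]
    by_cases hd : d.contains x = true <;> by_cases hm : x ∈ acc
    · -- kept out: already in acc
      have hrec := ih acc
      simp [hd, hm] at hrec ⊢
      rw [hrec]
      congr 1
      simp only [PySem.Set.discard, List.filter_filter]
      apply List.filter_congr
      intro y hy
      by_cases hyx : y = x
      · subst hyx; simp [hm]
      · simp [hyx]
    · -- appended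
      have hrec := ih (acc ++ [x])
      simp [hd, hm] at hrec ⊢
      rw [hrec]
      simp only [PySem.Set.discard, List.filter_filter]
      congr 2
      apply List.filter_congr
      intro y hy
      by_cases hyx : y = x
      · subst hyx; simp
      · simp [hyx]
    · -- d does not contain x
      have hrec := ih acc
      simp [hd, hm] at hrec ⊢
      rw [hrec]
      congr 1
      simp only [PySem.Set.discard, List.filter_filter]
      apply List.filter_congr
      intro y hy
      by_cases hyx : y = x
      · subst hyx; simp [hd]
      · simp [hyx]
    · have hrec := ih acc
      simp [hd, hm] at hrec ⊢
      rw [hrec]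
      congr 1
      simp only [PySem.Set.discard, List.filter_filter]
      apply List.filter_congr
      intro y hy
      by_cases hyx : y = x
      · subst hyx; simp [hd]
      · simp [hyx]

theorem idxOf?_of_mem (l : List String) (a : String) (h : a ∈ l) :
    List.idxOf? a l = some (l.idxOf a) := by
  induction l with
  | nil => simp at h
  | cons x t ih =>
    by_cases hx : x = a
    · simp [List.idxOf?_cons, hx]
    · have ha : a ∈ t := by
        rcases List.mem_cons.mp h with h1 | h1
        · exact absurd h1.symm hx
        · exact h1
      simp [List.idxOf?_cons, hx, ih ha]
theorem find?_filter_of_mem (items : List (String × Int)) (kf : List String) (k : String)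
    (hk : kf.contains k = true) :
    (items.filter (fun p => kf.contains p.1)).find? (fun p => p.1 == k)
      = items.find? (fun p => p.1 == k) := by
  have hk' : k ∈ kf := by simpa using hk
  induction items with
  | nil => rfl
  | cons p t ih =>
    by_cases hp : p.1 = k
    · simp [hp, hk']
    · by_cases hkeep : p.1 ∈ kf
      · simpa [List.find?_cons, hkeep, hp] using ih
      · simpa [List.filter_cons, hkeep, hp] using ih


-- specialization of buildPair to B's actual initial state
theorem buildPair0 (d : PySem.Dict String Int) (kf : List String) :
    kf.foldl (fun (acc : List String × PySem.Set String) k =>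
        if d.contains k && !(acc.2.contains k) then (acc.1 ++ [k], acc.2.add k) else acc)
      ([], PySem.Set.empty)
    = (kf.foldl (fun a k => if d.contains k && !(a.contains k) then a ++ [k] else a) [],
       kf.foldl (fun a k => if d.contains k && !(a.contains k) then a ++ [k] else a) []) :=
  buildPair d kf []

theorem main_eq (dict : List (String × Int)) (x : String) (t : List String) :
    get_columns_and_values dict (some (x :: t)) = get_columns_and_values_alt dict (some (x :: t)) := by
  unfold get_columns_and_values get_columns_and_values_alt
  show
    (PySem.List.sorted
        (List.foldl (fun dd key => if (x :: t).contains key then dd else dd.erase key)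
          (PySem.Dict.ofList dict) (PySem.Dict.ofList dict).keys).keys
        (fun k => (PySem.List.index? (x :: t) k).getD 0),
      (PySem.List.sorted
        (List.foldl (fun dd key => if (x :: t).contains key then dd else dd.erase key)
          (PySem.Dict.ofList dict) (PySem.Dict.ofList dict).keys).keys
        (fun k => (PySem.List.index? (x :: t) k).getD 0)).map
        (fun k => ((List.foldl (fun dd key => if (x :: t).contains key then dd else dd.erase key)
          (PySem.Dict.ofList dict) (PySem.Dict.ofList dict).keys).get? k).getD 0))
    =
    (((x :: t).foldl (fun (acc : List String × PySem.Set String) k =>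
          if (PySem.Dict.ofList dict).contains k && !(acc.2.contains k)
          then (acc.1 ++ [k], acc.2.add k) else acc) ([], PySem.Set.empty)).1,
      ((x :: t).foldl (fun (acc : List String × PySem.Set String) k =>
          if (PySem.Dict.ofList dict).contains k && !(acc.2.contains k)
          then (acc.1 ++ [k], acc.2.add k) else acc) ([], PySem.Set.empty)).1.map
        (fun k => ((PySem.Dict.ofList dict).get? k).getD 0))
  set d := PySem.Dict.ofList dict with hd
  set KF := x :: t with hKF
  set d2 := List.foldl (fun dd key => if KF.contains key then dd else dd.erase key) d d.keys with hd2
  rw [buildPair0 d KF]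
  set L := KF.foldl (fun a k => if d.contains k && !(a.contains k) then a ++ [k] else a) [] with hLdef
  -- characterize the two key lists
  have hL : L = (PySem.Set.ofList KF).filter (fun k => d.contains k) := by
    rw [hLdef, buildChar d KF []]
    simp
  have hitems : d2.items = d.items.filter (fun p => KF.contains p.1) := by
    rw [hd2, eraseLoop_items]
    apply List.filter_congr
    intro p hp
    have hpk : p.1 ∈ d.keys := List.mem_map_of_mem hp
    simp [hpk]
  have hkeys2 : d2.keys = (d.items.filter (fun p => KF.contains p.1)).map Prod.fst := by
    simp only [PySem.Dict.keys, hitems]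
  have hnd : d.keys.Nodup := PySem.Dict.nodup_keys_ofList dict
  have hnd2 : d2.keys.Nodup := by
    rw [hkeys2]
    exact hnd.sublist (List.filter_sublist.map Prod.fst)
  have hndL : L.Nodup := by
    rw [hL]
    exact (PySem.Set.nodup_ofList KF).filter _
  have hmem : ∀ y, y ∈ L ↔ y ∈ d2.keys := by
    intro y
    rw [hL, hkeys2]
    constructor
    · intro hy
      rcases List.mem_filter.mp hy with ⟨hy1, hy2⟩
      have hyKF : y ∈ KF := (PySem.Set.mem_ofList _ _).mp hy1
      have hyk : y ∈ d.keys := (PySem.Dict.contains_iff_mem_keys d y).mp hy2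
      rcases List.mem_map.mp hyk with ⟨p, hp, hpy⟩
      exact List.mem_map.mpr ⟨p, List.mem_filter.mpr ⟨hp, by simpa [hpy] using hyKF⟩, hpy⟩
    · intro hy
      rcases List.mem_map.mp hy with ⟨p, hp, hpy⟩
      rcases List.mem_filter.mp hp with ⟨hp1, hp2⟩
      refine List.mem_filter.mpr ⟨(PySem.Set.mem_ofList _ _).mpr ?_, ?_⟩
      · subst hpy; simpa using hp2
      · exact (PySem.Dict.contains_iff_mem_keys d y).mpr (hpy ▸ List.mem_map_of_mem hp1)
  have hperm : L.Perm d2.keys := by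
    refine List.perm_of_nodup_nodup_toFinset_eq hndL hnd2 ?_
    ext y
    simp [List.mem_toFinset, hmem y]
  have hLsub : ∀ y ∈ L, y ∈ KF := by
    intro y hy
    rw [hL] at hy
    exact (PySem.Set.mem_ofList _ _).mp (List.mem_filter.mp hy).1
  have hpairwise : L.Pairwise
      (fun a b => ((PySem.List.index? KF a).getD 0 : Nat) < (PySem.List.index? KF b).getD 0) := by
    have h0 : (PySem.Set.ofList KF).Pairwise (fun a b => KF.idxOf a < KF.idxOf b) :=
      dedup_pairwise_idxOf KF
    have h1 : L.Pairwise (fun a b => KF.idxOf a < KF.idxOf b) := by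
      rw [hL]; exact h0.filter _
    refine h1.imp_of_mem ?_
    intro a b ha hb hab
    rw [PySem.List.index?_eq_idxOf?, PySem.List.index?_eq_idxOf?,
        idxOf?_of_mem KF a (hLsub a ha), idxOf?_of_mem KF b (hLsub b hb)]
    simpa using hab
  have hsorted : PySem.List.sorted d2.keys (fun k => (PySem.List.index? KF k).getD 0) = L :=
    PySem.List.sorted_eq_of_perm_of_pairwise_lt _ _ _ hperm hpairwise
  have hget : ∀ k ∈ L, (d2.get? k).getD 0 = (d.get? k).getD 0 := by
    intro k hk
    have hkc : KF.contains k = true := by simpa using hLsub k hk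
    simp only [PySem.Dict.get?, hitems, find?_filter_of_mem _ _ _ hkc]
  rw [hsorted]
  exact Prod.ext rfl (List.map_congr_left hget)


-- ===== VERDICT (by name: the statement is the Claim_ definition above) =====
theorem get_columns_and_values_spec : Claim_equal_get_columns_and_values := by
  intro dict keys_filter _
  unfold Spec_get_columns_and_values
  cases keys_filter with
  | none => rfl
  | some kf =>
    cases kf with
    | nil => rfl
    | cons x t => exact main_eq dict x t
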